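-- pv_equiv track=rewrite | github.com/AdirB100/CS1001.py-HW | HW5/hw5_sol.py | prefix_suffix_overlap
-- ===== SOURCE A (Python) =====
-- def prefix_suffix_overlap(lst, k):
--     sol_lst = []
--     n = len(lst)
--     for i in range(n):
--         reisha = lst[i][:k]
--         for j in range(n):
--             if j == i:
--                 continue
--             seifa = lst[j][-k:]
--             if reisha == seifa:
--                 sol_lst.append((i, j))
--     return sol_lst
-- ===== SOURCE B (Python) =====
-- def prefix_suffix_overlap(lst, k):
--     by_suffix = {}
--     for j, s in enumerate(lst):
--         by_suffix.setdefault(s[-k:], []).append(j)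
--     out = []
--     for i, s in enumerate(lst):
--         for j in by_suffix.get(s[:k], ()):
--             if j != i:
--                 out.append((i, j))
--     return out
-- ===== Notes on version B (the rewrite author's own statement) =====
-- stated objective: faster
-- what changed: Replaces the O(n^2) all-pairs scan by a one-pass dict grouping suffix -> index list, then a single lookup of each prefix (output order preserved since the grouped index lists are ascending).
import Mathlib
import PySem

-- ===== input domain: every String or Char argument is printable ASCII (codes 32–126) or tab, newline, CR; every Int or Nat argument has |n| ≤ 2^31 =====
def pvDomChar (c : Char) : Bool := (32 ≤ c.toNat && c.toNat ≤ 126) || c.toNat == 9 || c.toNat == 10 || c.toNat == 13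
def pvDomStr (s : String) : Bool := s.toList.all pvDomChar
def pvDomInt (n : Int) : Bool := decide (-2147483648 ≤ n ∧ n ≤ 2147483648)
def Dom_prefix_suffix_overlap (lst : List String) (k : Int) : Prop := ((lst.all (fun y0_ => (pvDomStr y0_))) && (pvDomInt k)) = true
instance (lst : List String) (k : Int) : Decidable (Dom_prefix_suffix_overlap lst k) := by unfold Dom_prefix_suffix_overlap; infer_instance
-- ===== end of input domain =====

-- B replaces the O(n^2) all-pairs scan by a dict grouping suffix -> ascending index list,
-- then looks up each prefix once (faster: asymptotic change measured by the check).

-- ===== PORT A =====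
def prefix_suffix_overlap (lst : List String) (k : Int) : List (Int × Int) :=
  let n : Int := PySem.List.len lst
  (PySem.List.pyRange 0 n 1).foldl (fun sol_lst i =>
    let reisha := PySem.Str.slice (PySem.List.pyGetD lst i "") none (some k)
    (PySem.List.pyRange 0 n 1).foldl (fun sol_lst j =>
      if j == i then sol_lst
      else
        let seifa := PySem.Str.slice (PySem.List.pyGetD lst j "") (some (-k)) none
        if reisha == seifa then sol_lst ++ [(i, j)] else sol_lst) sol_lst) []

-- ===== PORT B =====
def prefix_suffix_overlap_alt (lst : List String) (k : Int) : List (Int × Int) :=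
  let by_suffix : PySem.Dict String (List Int) :=
    (PySem.List.enumerate lst 0).foldl
      (fun d p => d.modify (PySem.Str.slice p.2 (some (-k)) none) [] (· ++ [p.1]))
      PySem.Dict.empty
  (PySem.List.enumerate lst 0).foldl (fun out p =>
    (by_suffix.getD (PySem.Str.slice p.2 none (some k)) []).foldl
      (fun out j => if j != p.1 then out ++ [(p.1, j)] else out) out) []

-- ===== PRECONDITION & SPEC =====
def Spec_prefix_suffix_overlap (lst : List String) (k : Int) (out : List (Int × Int)) : Prop := out = prefix_suffix_overlap_alt lst k
instance (lst : List String) (k : Int) (out : List (Int × Int)) : Decidable (Spec_prefix_suffix_overlap lst k out) := by unfold Spec_prefix_suffix_overlap; infer_instance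

-- ===== CLAIM (what is proved, stated in full; the proofs are below) =====
def Claim_equal_prefix_suffix_overlap : Prop := ∀ (lst : List String) (k : Int), Dom_prefix_suffix_overlap lst k → Spec_prefix_suffix_overlap lst k (prefix_suffix_overlap lst k)


-- ===== LEMMAS AND PROOFS =====

-- A's inner loop over j: skip j = i, append (i, j) when the prefix matches j's suffix.
lemma psoA_inner (R : List Int) (i : Int) (r : String) (s : Int → String) (sol : List (Int × Int)) :
    R.foldl (fun sol_lst j => if j == i then sol_lst
      else if r == s j then sol_lst ++ [(i, j)] else sol_lst) sol
      = sol ++ (R.filter (fun j => j != i && r == s j)).map (fun j => (i, j)) := by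
  have hf : (fun (sol_lst : List (Int × Int)) (j : Int) => if j == i then sol_lst
        else if r == s j then sol_lst ++ [(i, j)] else sol_lst)
      = fun sol_lst j => if (j != i && r == s j) then sol_lst ++ [(i, j)] else sol_lst := by
    funext a j
    by_cases h : j = i
    · simp [h]
    · simp [h]
  rw [hf, PySem.List.foldl_append_if]

-- B's grouping dict: looking up key c yields exactly the ascending indices whose suffix is c.
lemma psoB_lookup (lst : List String) (k : Int) (c : String) :
    ((PySem.List.enumerate lst).foldl
        (fun d p => d.modify (PySem.Str.slice p.2 (some (-k)) none) [] (· ++ [p.1]))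
        (PySem.Dict.empty : PySem.Dict String (List Int))).getD c []
      = (PySem.List.pyRange 0 (PySem.List.len lst) 1).filter
          (fun j => PySem.Str.slice (PySem.List.pyGetD lst j "") (some (-k)) none == c) := by
  have h1 : (PySem.List.enumerate lst).foldl
        (fun d p => d.modify (PySem.Str.slice p.2 (some (-k)) none) [] (· ++ [p.1]))
        (PySem.Dict.empty : PySem.Dict String (List Int))
      = ((PySem.List.enumerate lst).map
          (fun p => (PySem.Str.slice p.2 (some (-k)) none, p.1))).foldl
          (fun d q => d.modify q.1 [] (· ++ [q.2])) PySem.Dict.empty := by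
    rw [List.foldl_map]
  rw [h1, PySem.Dict.getD_foldl_modify_append, PySem.List.enumerate_eq_map_pyRange lst ""]
  simp [List.filter_map, Function.comp_def]

lemma psoBeq_symm (a b : String) : (a == b) = (b == a) := by
  by_cases h : a = b
  · simp [h]
  · simp [h, Ne.symm h]

-- ===== VERDICT (by name: the statement is the Claim_ definition above) =====
theorem prefix_suffix_overlap_spec : Claim_equal_prefix_suffix_overlap := by
  intro lst k _
  unfold Spec_prefix_suffix_overlap
  simp only [prefix_suffix_overlap, prefix_suffix_overlap_alt, psoA_inner, psoB_lookup,
    PySem.List.foldl_append_if, PySem.List.foldl_append_eq_flatMap, List.nil_append]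
  rw [PySem.List.enumerate_eq_map_pyRange lst ""]
  rw [List.flatMap_map]
  congr 1
  funext i
  rw [List.filter_filter]
  congr 1
  apply List.filter_congr
  intro j _
  rw [psoBeq_symm]
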